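-- pv_equiv track=rewrite | github.com/yiyilinghun/pj | pj_tools/auto_compile_ice_assist.py | erase_all_blank
-- ===== SOURCE A (Python) =====
-- def erase_all_blank(text):
--     while text.find(' ') >= 0:
--         text = text.replace(' ', '')
--
--     while text.find('\n') >= 0:
--         text = text.replace('\n', '')
--
--     while text.find('\t') >= 0:
--         text = text.replace('\t', '')
--     return text
-- ===== SOURCE B (Python) =====
-- def erase_all_blank(text):
--     return text.translate(str.maketrans('', '', ' \n\t'))
-- ===== Notes on version B (the rewrite author's own statement) =====
-- stated objective: idiomatic
-- what changed: Replaces the three sequential find/replace while-loops with a single translate() pass that deletes exactly space, newline and tab.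
import Mathlib
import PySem

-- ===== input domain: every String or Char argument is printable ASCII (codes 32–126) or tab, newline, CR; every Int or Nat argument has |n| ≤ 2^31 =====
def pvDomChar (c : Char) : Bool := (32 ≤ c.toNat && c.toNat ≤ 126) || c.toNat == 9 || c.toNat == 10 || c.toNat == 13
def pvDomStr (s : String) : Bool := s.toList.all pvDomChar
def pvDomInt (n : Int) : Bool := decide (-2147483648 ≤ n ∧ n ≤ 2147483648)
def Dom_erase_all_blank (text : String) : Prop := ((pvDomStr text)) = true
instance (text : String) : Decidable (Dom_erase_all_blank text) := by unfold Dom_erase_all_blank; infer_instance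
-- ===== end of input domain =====

-- B replaces A's three sequential find/replace while-loops with one translate() pass deleting exactly ' ', '\n', '\t' (idiomatic; return value only).


-- ===== PORT A =====
-- replace of a single-char pattern by '' removes every occurrence: needed for termination of the while loop
theorem pv_replace_go_single (c : Char) (fuel : Nat) (l acc : List Char)
    (h : l.length ≤ fuel) :
    PySem.Chars.replace.go [c] [] fuel l acc = acc.reverse ++ l.filter (fun x => x != c) := by
  induction fuel generalizing l acc with
  | zero =>
    interval_cases hl : l.length
    · simp at hl; subst hl; simp [PySem.Chars.replace.go]
  | succ n ih =>
    cases l with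
    | nil => simp [PySem.Chars.replace.go]
    | cons x t =>
      by_cases hx : x = c
      · subst hx
        have : PySem.Chars.replace.go [x] [] (n+1) (x :: t) acc
            = PySem.Chars.replace.go [x] [] n t acc := by
          simp [PySem.Chars.replace.go, List.isPrefixOf]
        rw [this, ih t acc (by simpa using Nat.lt_succ_iff.mp (by simpa using h))]
        simp
      · have : PySem.Chars.replace.go [c] [] (n+1) (x :: t) acc
            = PySem.Chars.replace.go [c] [] n t (x :: acc) := by
          have hx' : (c == x) = false := by simp [Ne.symm hx]
          simp [PySem.Chars.replace.go, List.isPrefixOf, hx']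
        rw [this, ih t (x :: acc) (by simpa using Nat.lt_succ_iff.mp (by simpa using h))]
        simp [hx]

theorem pv_replace_single (c : Char) (s : List Char) :
    PySem.Chars.replace s [c] [] = s.filter (fun x => x != c) := by
  simp [PySem.Chars.replace, pv_replace_go_single c s.length s [] le_rfl]

theorem pv_strReplace_single (c : Char) (s : String) :
    PySem.Str.replace s (String.ofList [c]) (String.ofList []) =
      String.ofList (s.toList.filter (fun x => x != c)) := by
  simp only [PySem.Str.replace, String.toList_ofList, pv_replace_single]

theorem pv_len_replace_lt (c : Char) (s : String)
    (h : 0 ≤ PySem.Str.find s (String.ofList [c])) :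
    (PySem.Str.replace s (String.ofList [c]) (String.ofList [])).length < s.length := by
  rw [pv_strReplace_single]
  have hmem : c ∈ s.toList := by
    have hinf := (PySem.Str.find_nonneg_iff (s := s) (sub := String.ofList [c])).mp h
    have h2 : [c] <:+: s.toList := by simpa using hinf
    rcases h2 with ⟨p, q, hpq⟩
    exact hpq ▸ (by simp)
  have : (s.toList.filter (fun x => x != c)).length < s.toList.length := by
    apply List.length_filter_lt_length_iff_exists.mpr
    exact ⟨c, hmem, by simp⟩
  simpa using this

-- while text.find(c) >= 0: text = text.replace(c, '')
def pv_whileErase (c : Char) (s : String) : String :=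
  if 0 ≤ PySem.Str.find s (String.ofList [c]) then
    pv_whileErase c (PySem.Str.replace s (String.ofList [c]) (String.ofList []))
  else s
termination_by s.length
decreasing_by exact pv_len_replace_lt c s (by assumption)

def erase_all_blank (text : String) : String :=
  pv_whileErase '\t' (pv_whileErase '\n' (pv_whileErase ' ' text))

-- ===== PORT B =====
-- text.translate(str.maketrans('', '', ' \n\t')) : delete exactly those three chars in one pass
-- (ported by hand as a filter over the code points; exact on the ASCII domain)
def erase_all_blank_alt (text : String) : String :=
  String.ofList (text.toList.filter (fun ch => !(ch == ' ' || ch == '\n' || ch == '\t')))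

-- ===== PRECONDITION & SPEC =====
def Spec_erase_all_blank (text : String) (out : String) : Prop := out = erase_all_blank_alt text
instance (text : String) (out : String) : Decidable (Spec_erase_all_blank text out) := by unfold Spec_erase_all_blank; infer_instance

-- ===== CLAIM (what is proved, stated in full; the proofs are below) =====
def Claim_equal_erase_all_blank : Prop := ∀ (text : String), Dom_erase_all_blank text → Spec_erase_all_blank text (erase_all_blank text)

-- ===== LEMMAS AND PROOFS =====
theorem pv_find_filter_neg (c : Char) (l : List Char) :
    PySem.Chars.find (l.filter (fun x => x != c)) [c] = -1 := by
  rw [PySem.Chars.find_eq_neg_one_iff]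
  intro hinf
  rcases hinf with ⟨p, q, hpq⟩
  have : c ∈ l.filter (fun x => x != c) := hpq ▸ (by simp)
  simp at this

theorem pv_whileErase_eq (c : Char) (s : String) :
    pv_whileErase c s = String.ofList (s.toList.filter (fun x => x != c)) := by
  rw [pv_whileErase]
  by_cases h : 0 ≤ PySem.Str.find s (String.ofList [c])
  · rw [if_pos h, pv_whileErase, pv_strReplace_single]
    have hf : PySem.Str.find (String.ofList (s.toList.filter (fun x => x != c))) (String.ofList [c]) = -1 := by
      simpa [PySem.Str.find] using pv_find_filter_neg c s.toList
    rw [if_neg (by rw [hf]; norm_num)]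
  · rw [if_neg h]
    have hninf : ¬ [c] <:+: s.toList := by
      intro hinf
      exact h ((PySem.Str.find_nonneg_iff (s := s) (sub := String.ofList [c])).mpr (by simpa using hinf))
    have hmem : c ∉ s.toList := by
      intro hm
      rcases List.append_of_mem hm with ⟨p, q, hpq⟩
      exact hninf ⟨p, q, by simpa using hpq.symm⟩
    have : s.toList.filter (fun x => x != c) = s.toList := by
      apply List.filter_eq_self.mpr
      intro a ha
      simp only [bne_iff_ne, ne_eq]
      intro hac; exact hmem (hac ▸ ha)
    rw [this, String.ofList_toList]

-- ===== VERDICT (by name: the statement is the Claim_ definition above) =====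
theorem erase_all_blank_spec : Claim_equal_erase_all_blank := by
  intro text _
  unfold Spec_erase_all_blank erase_all_blank erase_all_blank_alt
  rw [pv_whileErase_eq, pv_whileErase_eq, pv_whileErase_eq]
  simp only [String.toList_ofList, List.filter_filter]
  congr 1
  apply List.filter_congr
  intro a _
  cases ha : a == ' ' <;> cases hb : a == '\n' <;> cases hc : a == '\t' <;>
    simp_all [bne]
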